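-- pv_equiv track=rewrite | github.com/aakhoja/Practice-Problems | codeSignalAssesment.py | solution
-- ===== SOURCE A (Python) =====
-- def solution(grid, a, b):
--     if a + b - 1 > min(len(grid), len(grid[0])):
--         return 0
--
--     ret = 0
--     for w, h in ((a, b), (b, a)):
--         # for every possible leftmost axb/bxa rectangle...
--         for start in range(min(len(grid), len(grid[0])) - (a + b - 1) + 1):
--             i = start
--             cur = 0
--             deques = []
--             j1 = j2 = w - 1
--             # build the rectangle
--             while j1 <= j2:
--                 for k in range(j1, j2 + 1):
--                     cur += grid[i][k]
--                 deques.append((j1, j2))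
--                 j1 += (-1 if i - start < w - 1 else 1)
--                 j2 += (1 if i - start < h - 1 else -1)
--                 i += 1
--
--             stop = False
--             # slide it to the right until you can't anymore
--             while True:
--                 ret = max(ret, cur)
--
--                 for ind, tup in enumerate(deques):
--                     j1, j2 = tup
--                     i = start + ind
--                     if j2 == len(grid[0]) - 1:
--                         stop = True
--                         break
--                     j2 += 1
--                     cur += grid[i][j2] - grid[i][j1]
--                     j1 += 1
--                     deques[ind] = (j1, j2)
--
--                 if stop:
--                     break
--
--     return ret
-- ===== SOURCE B (Python) =====
-- def solution(grid, a, b):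
--     n = len(grid)
--     m = len(grid[0])
--     if a + b - 1 > min(n, m):
--         return 0
--     # per-row prefix sums: P[i][k] = grid[i][0] + ... + grid[i][k-1]
--     P = []
--     for row in grid:
--         ps = [0]
--         for x in row:
--             ps.append(ps[-1] + x)
--         P.append(ps)
--     span = a + b - 1
--     best = 0
--     for w, h in ((a, b), (b, a)):
--         for start in range(min(n, m) - span + 1):
--             for t in range(m - span + 1):
--                 s = 0
--                 for d in range(span):
--                     j1 = abs(w - 1 - d)
--                     j2 = (w - 1) + (d if d <= h - 1 else 2 * (h - 1) - d)
--                     s += P[start + d][t + j2 + 1] - P[start + d][t + j1]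
--                 best = max(best, s)
--     return best
-- ===== Notes on version B (the rewrite author's own statement) =====
-- stated objective: alternative
-- what changed: A builds each leftmost diamond cell-by-cell and then slides it rightward, maintaining a deque of per-row column intervals and an incrementally updated running sum with an early-break stop flag; B directly enumerates every diamond position with closed-form row boundaries (j1=|w-1-d|, j2=w-1+min(d,2(h-1)-d)) and reads each row segment from precomputed per-row prefix sums.
-- outside the precondition, e.g. on solution([[0, 1], [1, 1], [0, 1]], 0, 2): A returns 2, B returns 0; on solution([[1, 0, -3], [1, 3, 3, 2], [3, 2]], 2, 2): A returns 9, B returns 9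
import Mathlib
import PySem

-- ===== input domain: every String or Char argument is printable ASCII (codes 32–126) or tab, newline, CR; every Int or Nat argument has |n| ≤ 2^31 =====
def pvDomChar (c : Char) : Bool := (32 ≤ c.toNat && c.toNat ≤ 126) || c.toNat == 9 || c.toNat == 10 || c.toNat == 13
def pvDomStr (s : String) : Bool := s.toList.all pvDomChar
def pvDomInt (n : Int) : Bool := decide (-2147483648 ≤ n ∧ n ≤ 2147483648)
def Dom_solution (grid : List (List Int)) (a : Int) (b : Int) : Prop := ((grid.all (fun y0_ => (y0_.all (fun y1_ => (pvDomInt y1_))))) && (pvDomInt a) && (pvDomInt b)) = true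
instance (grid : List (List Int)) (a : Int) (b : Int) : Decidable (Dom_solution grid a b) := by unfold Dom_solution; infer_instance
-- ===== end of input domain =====

-- B replaces A's incremental build-then-slide bookkeeping by a direct enumeration of all
-- diamond positions with closed-form row boundaries and per-row prefix sums (objective:
-- alternative structure, similar cost; equivalence of return values is what is proved).

-- ===== PORT A =====

-- grid[i][k] (Python indexing, negative wraps); 0 where Python would raise (outside Pre_)
def pvGet2 (g : List (List Int)) (i k : Int) : Int :=
  ((PySem.List.pyGet? g i).bind (fun row => PySem.List.pyGet? row k)).getD 0

-- the 'while j1 <= j2' build loop; fuel is an upper bound on the iteration count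
def pvBuildA (g : List (List Int)) (start w h : Int) :
    Nat → Int → Int → Int → Int → List (Int × Int) → Int × List (Int × Int)
  | 0, _, _, _, cur, dq => (cur, dq)
  | fuel+1, i, j1, j2, cur, dq =>
    if j1 ≤ j2 then
      pvBuildA g start w h fuel (i + 1)
        (j1 + (if i - start < w - 1 then -1 else 1))
        (j2 + (if i - start < h - 1 then 1 else -1))
        ((PySem.List.pyRange j1 (j2 + 1) 1).foldl (fun c k => c + pvGet2 g i k) cur)
        (dq ++ [(j1, j2)])
    else (cur, dq)

-- the 'for ind, tup in enumerate(deques)' pass with early break (m1 = len(grid[0]) - 1)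
def pvInnerA (g : List (List Int)) (m1 : Int) : Int → Int → List (Int × Int) → Bool × Int × List (Int × Int)
  | _, cur, [] => (false, cur, [])
  | i, cur, (j1, j2) :: rest =>
    if j2 = m1 then (true, cur, (j1, j2) :: rest)
    else
      let r := pvInnerA g m1 (i + 1) (cur + pvGet2 g i (j2 + 1) - pvGet2 g i j1) rest
      (r.1, r.2.1, (j1 + 1, j2 + 1) :: r.2.2)

-- the 'while True' slide loop
def pvSlideA (g : List (List Int)) (m1 start : Int) : Nat → Int → Int → List (Int × Int) → Int
  | 0, ret, _, _ => ret
  | fuel+1, ret, cur, dq =>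
    let r := pvInnerA g m1 start cur dq
    if r.1 then max ret cur else pvSlideA g m1 start fuel (max ret cur) r.2.1 r.2.2

def solution (grid : List (List Int)) (a : Int) (b : Int) : Int :=
  let n : Int := grid.length
  let m : Int := (grid.headD []).length
  if a + b - 1 > min n m then 0
  else
    [(a, b), (b, a)].foldl (fun ret wh =>
      (PySem.List.pyRange 0 (min n m - (a + b - 1) + 1) 1).foldl (fun ret start =>
        let bd := pvBuildA grid start wh.1 wh.2 (a + b).toNat start (wh.1 - 1) (wh.1 - 1) 0 []
        pvSlideA grid (m - 1) start (m.toNat + 1) ret bd.1 bd.2) ret) 0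

-- ===== PORT B =====

-- ps = [0]; for x in row: ps.append(ps[-1] + x)
def pvPref : Int → List Int → List Int
  | s, [] => [s]
  | s, x :: xs => s :: pvPref (s + x) xs

def solution_alt (grid : List (List Int)) (a : Int) (b : Int) : Int :=
  let n : Int := grid.length
  let m : Int := (grid.headD []).length
  if a + b - 1 > min n m then 0
  else
    let P := grid.map (pvPref 0)
    let span := a + b - 1
    [(a, b), (b, a)].foldl (fun best wh =>
      (PySem.List.pyRange 0 (min n m - span + 1) 1).foldl (fun best start =>
        (PySem.List.pyRange 0 (m - span + 1) 1).foldl (fun best t =>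
          max best ((PySem.List.pyRange 0 span 1).foldl (fun s d =>
            s + (pvGet2 P (start + d) (t + ((wh.1 - 1) + (if d ≤ wh.2 - 1 then d else 2 * (wh.2 - 1) - d)) + 1)
                 - pvGet2 P (start + d) (t + |wh.1 - 1 - d|))) 0)) best) best) 0

-- ===== PRECONDITION & SPEC =====
-- Pre_ excludes empty grids and, unless the early size test already returns 0, nonpositive
-- side lengths (A indexes with negative numbers: accidental wraparound values or IndexError)
-- and grids one of whose first min(n,m) rows is shorter than row 0 (A usually raises
-- IndexError there; where it happens to return, B returns the same value).
def Pre_solution (grid : List (List Int)) (a : Int) (b : Int) : Prop :=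
  grid ≠ [] ∧
    (min (grid.length : Int) ((grid.headD []).length : Int) < a + b - 1 ∨
      (1 ≤ a ∧ 1 ≤ b ∧
        ∀ row ∈ grid.take (min grid.length (grid.headD []).length),
          (grid.headD []).length ≤ row.length))
instance (grid : List (List Int)) (a : Int) (b : Int) : Decidable (Pre_solution grid a b) := by
  unfold Pre_solution; infer_instance

def pvWitness_solution : List (List Int) × Int × Int := ([[1, 2], [3, 4]], 1, 1)

def Spec_solution (grid : List (List Int)) (a : Int) (b : Int) (out : Int) : Prop := out = solution_alt grid a b
instance (grid : List (List Int)) (a : Int) (b : Int) (out : Int) : Decidable (Spec_solution grid a b out) := by unfold Spec_solution; infer_instance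

-- ===== CLAIM (what is proved, stated in full; the proofs are below) =====
def Claim_equal_solution : Prop := ∀ (grid : List (List Int)) (a : Int) (b : Int), Dom_solution grid a b → Pre_solution grid a b → Spec_solution grid a b (solution grid a b)

-- ===== LEMMAS AND PROOFS =====

-- closed-form diamond boundaries for row offset d (A maintains these incrementally)
def pvJ1 (w d : Int) : Int := if d ≤ w - 1 then w - 1 - d else d - (w - 1)
def pvJ2 (w h d : Int) : Int := (w - 1) + (if d ≤ h - 1 then d else 2 * (h - 1) - d)

-- sum of grid[i][lo..hi-1]
def pvSeg (g : List (List Int)) (i lo hi : Int) : Int :=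
  ((PySem.List.pyRange lo hi 1).map (fun k => pvGet2 g i k)).sum

-- total of the diamond with top row `start`, horizontal shift t
def pvDsum (g : List (List Int)) (w h start t : Int) : Int :=
  ((PySem.List.pyRange 0 (w + h - 1) 1).map
    (fun d => pvSeg g (start + d) (t + pvJ1 w d) (t + pvJ2 w h d + 1))).sum

-- the deques list from row offset dlo on, at shift t
def pvShape (w h t dlo : Int) : List (Int × Int) :=
  (PySem.List.pyRange dlo (w + h - 1) 1).map (fun d => (t + pvJ1 w d, t + pvJ2 w h d))

theorem pvJ1_abs (w d : Int) : |w - 1 - d| = pvJ1 w d := by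
  unfold pvJ1; by_cases h : d ≤ w - 1
  · rw [if_pos h, abs_of_nonneg (by omega)]
  · rw [if_neg h, abs_of_neg (by omega)]; ring

theorem pvJ2_le (w h d : Int) : pvJ2 w h d ≤ w + h - 2 := by
  unfold pvJ2; split_ifs <;> omega

theorem pvJ1J2_le (w h d : Int) (hw : 1 ≤ w) (hh : 1 ≤ h) (hd : 0 ≤ d) :
    pvJ1 w d ≤ pvJ2 w h d ↔ d ≤ w + h - 2 := by
  unfold pvJ1 pvJ2; split_ifs <;> omega

theorem pvSeg_cons (g : List (List Int)) (i lo hi : Int) (h : lo < hi) :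
    pvSeg g i lo hi = pvGet2 g i lo + pvSeg g i (lo + 1) hi := by
  unfold pvSeg; rw [PySem.List.pyRange_one_cons h]; simp

theorem pvSeg_snoc (g : List (List Int)) (i lo hi : Int) (h : lo ≤ hi) :
    pvSeg g i lo (hi + 1) = pvSeg g i lo hi + pvGet2 g i hi := by
  unfold pvSeg; rw [PySem.List.pyRange_one_succ_right h]; simp

theorem pvSeg_shift (g : List (List Int)) (i lo hi : Int) (h : lo ≤ hi) :
    pvSeg g i (lo + 1) (hi + 1) = pvSeg g i lo hi + (pvGet2 g i hi - pvGet2 g i lo) := by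
  rcases lt_or_eq_of_le h with h' | h'
  · rw [pvSeg_snoc g i (lo + 1) hi (by omega), pvSeg_cons g i lo hi h']; ring
  · subst h'; simp [pvSeg, PySem.List.pyRange_one_eq_nil le_rfl]

theorem pv_sum_map_sub (f g : Int → Int) (l : List Int) :
    (l.map (fun d => f d - g d)).sum = (l.map f).sum - (l.map g).sum := by
  induction l with
  | nil => simp
  | cons x xs ih => simp [ih]; ring

-- the build loop computes the shift-0 diamond sum and the closed-form deques list
theorem pvBuildA_eq (g : List (List Int)) (start w h : Int) (hw : 1 ≤ w) (hh : 1 ≤ h) :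
    ∀ (c : Nat) (d cur : Int) (dq : List (Int × Int)), 0 ≤ d → d ≤ w + h - 1 →
      (w + h - 1 - d).toNat < c →
      pvBuildA g start w h c (start + d) (pvJ1 w d) (pvJ2 w h d) cur dq
        = (cur + ((PySem.List.pyRange d (w + h - 1) 1).map
              (fun d' => pvSeg g (start + d') (pvJ1 w d') (pvJ2 w h d' + 1))).sum,
           dq ++ pvShape w h 0 d) := by
  intro c
  induction c with
  | zero => intro d cur dq _ _ hc; omega
  | succ c ih =>
    intro d cur dq hd0 hd1 hc
    by_cases hdl : d ≤ w + h - 2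
    · have hlt : d < w + h - 1 := by omega
      have hj : pvJ1 w d ≤ pvJ2 w h d := (pvJ1J2_le w h d hw hh hd0).mpr hdl
      simp only [pvBuildA, if_pos hj]
      have hstep1 : pvJ1 w d + (if start + d - start < w - 1 then -1 else 1) = pvJ1 w (d + 1) := by
        unfold pvJ1; split_ifs <;> omega
      have hstep2 : pvJ2 w h d + (if start + d - start < h - 1 then 1 else -1) = pvJ2 w h (d + 1) := by
        unfold pvJ2; split_ifs <;> omega
      have hfold : (PySem.List.pyRange (pvJ1 w d) (pvJ2 w h d + 1) 1).foldl
          (fun c k => c + pvGet2 g (start + d) k) cur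
          = cur + pvSeg g (start + d) (pvJ1 w d) (pvJ2 w h d + 1) := by
        rw [PySem.List.foldl_add]; rfl
      rw [hstep1, hstep2, hfold, show start + d + 1 = start + (d + 1) by ring,
        ih (d + 1) _ _ (by omega) (by omega) (by omega)]
      rw [PySem.List.pyRange_one_cons hlt]
      unfold pvShape
      rw [PySem.List.pyRange_one_cons hlt]
      simp [List.append_assoc]
      ring
    · have hd : d = w + h - 1 := by omega
      have hj : ¬ pvJ1 w d ≤ pvJ2 w h d := by
        rw [pvJ1J2_le w h d hw hh hd0]; omega
      simp only [pvBuildA, if_neg hj]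
      unfold pvShape
      rw [hd, PySem.List.pyRange_one_eq_nil le_rfl]
      simp

theorem pvInnerA_stop (g : List (List Int)) (m1 : Int) :
    ∀ (dq : List (Int × Int)) (i cur : Int), (∃ p ∈ dq, p.2 = m1) →
      (pvInnerA g m1 i cur dq).1 = true := by
  intro dq
  induction dq with
  | nil => intro i cur h; simp at h
  | cons p rest ih =>
    intro i cur h
    obtain ⟨q, hq, hq2⟩ := h
    obtain ⟨j1, j2⟩ := p
    rcases List.mem_cons.mp hq with hq | hq
    · subst hq
      simp only [pvInnerA]
      rw [if_pos hq2]
    · by_cases hj : j2 = m1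
      · simp [pvInnerA, hj]
      · simp only [pvInnerA, if_neg hj]
        exact ih _ _ ⟨q, hq, hq2⟩

-- one full pass with no break: shifts every pair and adds the per-row deltas
theorem pvInnerA_noStop (g : List (List Int)) (m1 w h start t : Int) :
    ∀ (k : Nat) (dlo cur : Int), w + h - 1 - dlo = (k : Int) →
      (∀ d, dlo ≤ d → d < w + h - 1 → t + pvJ2 w h d ≠ m1) →
      pvInnerA g m1 (start + dlo) cur (pvShape w h t dlo)
        = (false,
           cur + ((PySem.List.pyRange dlo (w + h - 1) 1).map
             (fun d => pvGet2 g (start + d) (t + pvJ2 w h d + 1) - pvGet2 g (start + d) (t + pvJ1 w d))).sum,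
           pvShape w h (t + 1) dlo) := by
  intro k
  induction k with
  | zero =>
    intro dlo cur hk _
    have h1 : w + h - 1 ≤ dlo := by omega
    unfold pvShape
    rw [PySem.List.pyRange_one_eq_nil h1]
    simp [pvInnerA]
  | succ k ih =>
    intro dlo cur hk hno
    have hlt : dlo < w + h - 1 := by omega
    unfold pvShape
    rw [PySem.List.pyRange_one_cons hlt]
    simp only [List.map_cons]
    simp only [pvInnerA, if_neg (hno dlo le_rfl hlt)]
    have := ih (dlo + 1) (cur + pvGet2 g (start + dlo) (t + pvJ2 w h dlo + 1) - pvGet2 g (start + dlo) (t + pvJ1 w dlo))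
      (by omega) (fun d h1 h2 => hno d (by omega) h2)
    rw [show start + (dlo + 1) = start + dlo + 1 by ring] at this
    unfold pvShape at this
    rw [this]
    dsimp only
    simp only [List.sum_cons, Prod.mk.injEq, true_and]
    exact ⟨by ring, by rw [show t + pvJ1 w dlo + 1 = t + 1 + pvJ1 w dlo by ring,
      show t + pvJ2 w h dlo + 1 = t + 1 + pvJ2 w h dlo by ring]⟩

-- the slide loop is a running max of the diamond sums over all shifts
theorem pvSlideA_eq (g : List (List Int)) (w h start m : Int) (hw : 1 ≤ w) (hh : 1 ≤ h) :
    ∀ (c : Nat) (t ret : Int), 0 ≤ t → t ≤ m - (w + h - 1) →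
      (m - (w + h - 1) + 1 - t).toNat ≤ c →
      pvSlideA g (m - 1) start c ret (pvDsum g w h start t) (pvShape w h t 0)
        = (PySem.List.pyRange t (m - (w + h - 1) + 1) 1).foldl
            (fun r t' => max r (pvDsum g w h start t')) ret := by
  intro c
  induction c with
  | zero => intro t ret h0 h1 hc; omega
  | succ c ih =>
    intro t ret h0 h1 hc
    by_cases hlast : t = m - (w + h - 1)
    · have hstop : (pvInnerA g (m - 1) start (pvDsum g w h start t) (pvShape w h t 0)).1 = true := by
        apply pvInnerA_stop
        refine ⟨(t + pvJ1 w (h - 1), t + pvJ2 w h (h - 1)), ?_, ?_⟩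
        · exact List.mem_map_of_mem ((PySem.List.mem_pyRange_one).mpr ⟨by omega, by omega⟩)
        · show t + pvJ2 w h (h - 1) = m - 1
          unfold pvJ2; rw [if_pos le_rfl]; omega
      simp only [pvSlideA, hstop, if_true]
      rw [show m - (w + h - 1) + 1 = t + 1 by omega, PySem.List.pyRange_one_singleton]
      simp
    · have hno : ∀ d, 0 ≤ d → d < w + h - 1 → t + pvJ2 w h d ≠ m - 1 := by
        intro d _ _
        have := pvJ2_le w h d
        omega
      have hinner := pvInnerA_noStop g (m - 1) w h start t (w + h - 1).toNat 0
        (pvDsum g w h start t) (by omega) (fun d hd hd' => hno d hd hd')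
      rw [show start + 0 = start by ring] at hinner
      have hD : pvDsum g w h start t
            + ((PySem.List.pyRange 0 (w + h - 1) 1).map
                (fun d => pvGet2 g (start + d) (t + pvJ2 w h d + 1) - pvGet2 g (start + d) (t + pvJ1 w d))).sum
          = pvDsum g w h start (t + 1) := by
        have hcongr : ((PySem.List.pyRange 0 (w + h - 1) 1).map
              (fun d => pvGet2 g (start + d) (t + pvJ2 w h d + 1) - pvGet2 g (start + d) (t + pvJ1 w d))).sum
            = ((PySem.List.pyRange 0 (w + h - 1) 1).map
              (fun d => pvSeg g (start + d) (t + 1 + pvJ1 w d) (t + 1 + pvJ2 w h d + 1)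
                - pvSeg g (start + d) (t + pvJ1 w d) (t + pvJ2 w h d + 1))).sum := by
          apply congrArg
          apply List.map_congr_left
          intro d hd
          have hd' := (PySem.List.mem_pyRange_one).mp hd
          have hj : pvJ1 w d ≤ pvJ2 w h d := (pvJ1J2_le w h d hw hh hd'.1).mpr (by omega)
          have hs := pvSeg_shift g (start + d) (t + pvJ1 w d) (t + pvJ2 w h d + 1) (by omega)
          rw [show t + pvJ1 w d + 1 = t + 1 + pvJ1 w d by ring,
            show t + pvJ2 w h d + 1 + 1 = t + 1 + pvJ2 w h d + 1 by ring] at hs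
          omega
        rw [hcongr, pv_sum_map_sub]
        unfold pvDsum
        ring
      simp only [pvSlideA, hinner]
      norm_num
      rw [hD]
      rw [ih (t + 1) (max ret (pvDsum g w h start t)) (by omega) (by omega) (by omega)]
      rw [PySem.List.pyRange_one_cons (by omega : t < m - (w + h - 1) + 1)]
      simp

-- ===== B-side lemmas =====

theorem pvPref_get (row : List Int) : ∀ (k : Nat) (s : Int), k ≤ row.length →
    (pvPref s row)[k]? = some (s + (row.take k).sum) := by
  induction row with
  | nil =>
    intro k s hk
    have : k = 0 := Nat.le_zero.mp (by simpa using hk)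
    subst this; simp [pvPref]
  | cons x xs ih =>
    intro k s hk
    cases k with
    | zero => simp [pvPref]
    | succ k =>
      simp only [pvPref, List.getElem?_cons_succ]
      rw [ih k (s + x) (by simpa using hk)]
      simp [List.take_succ_cons]; ring

-- pvSeg over in-range columns equals a difference of take-sums of the row
theorem pvSeg_take (g : List (List Int)) (i : Int) (row : List Int)
    (hrow : PySem.List.pyGet? g i = some row) :
    ∀ (c : Nat) (lo hi : Int), 0 ≤ lo → lo ≤ hi → hi - lo = (c : Int) → hi ≤ row.length →
      pvSeg g i lo hi = (row.take hi.toNat).sum - (row.take lo.toNat).sum := by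
  intro c
  induction c with
  | zero =>
    intro lo hi h0 hlh hc _
    have : hi = lo := by omega
    subst this
    simp [pvSeg, PySem.List.pyRange_one_eq_nil le_rfl]
  | succ c ih =>
    intro lo hi h0 hlh hc hlen
    have hlo_lt : lo < hi := by omega
    have hget : pvGet2 g i (hi - 1) = row[(hi - 1).toNat]'(by omega) := by
      unfold pvGet2
      rw [hrow]
      simp only [Option.bind_some]
      rw [PySem.List.pyGet?_eq_some_getElem (i := hi - 1) row (by omega) (by omega)]
      rfl
    have := ih lo (hi - 1) h0 (by omega) (by omega) (by omega)
    calc pvSeg g i lo hi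
        = pvSeg g i lo (hi - 1) + pvGet2 g i (hi - 1) := by
          rw [← pvSeg_snoc g i lo (hi - 1) (by omega)]; norm_num
      _ = (row.take hi.toNat).sum - (row.take lo.toNat).sum := by
          rw [this, hget]
          have hsucc : hi.toNat = (hi - 1).toNat + 1 := by omega
          rw [hsucc, List.take_add_one, List.getElem?_eq_getElem (show (hi - 1).toNat < row.length by omega)]
          simp only [List.sum_append, Option.toList_some, List.sum_cons, List.sum_nil]
          ring

-- ===== assembly =====

theorem pvJ1_nonneg (w d : Int) (_hd : 0 ≤ d) (_hw : 1 ≤ w) : 0 ≤ pvJ1 w d := by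
  unfold pvJ1; split_ifs <;> omega

-- B's P[i][k] is the sum of the first k entries of row i
theorem pvGet2_pref (g : List (List Int)) (i k : Int) (row : List Int)
    (hrow : PySem.List.pyGet? g i = some row) (h0 : 0 ≤ i)
    (hk : 0 ≤ k) (hk2 : k ≤ (row.length : Int)) :
    pvGet2 (g.map (pvPref 0)) i k = (row.take k.toNat).sum := by
  have hrow' : g[i.toNat]? = some row := by
    rw [← PySem.List.pyGet?_of_nonneg g h0, hrow]
  unfold pvGet2
  rw [PySem.List.pyGet?_of_nonneg _ h0, List.getElem?_map, hrow']
  simp only [Option.map_some, Option.bind_some]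
  rw [PySem.List.pyGet?_of_nonneg _ hk, pvPref_get row k.toNat 0 (by omega)]
  simp

-- B's innermost loop computes the diamond sum
theorem pv_Bsum (grid : List (List Int)) (a b w h start t : Int)
    (hw : 1 ≤ w) (hh : 1 ≤ h) (hwh : w + h = a + b)
    (_hspan : a + b - 1 ≤ min (grid.length : Int) ((grid.headD []).length : Int))
    (hrows : ∀ row ∈ grid.take (min grid.length (grid.headD []).length),
      (grid.headD []).length ≤ row.length)
    (hs0 : 0 ≤ start)
    (hs1 : start ≤ min (grid.length : Int) ((grid.headD []).length : Int) - (a + b - 1))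
    (ht0 : 0 ≤ t) (ht1 : t ≤ ((grid.headD []).length : Int) - (a + b - 1)) :
    (PySem.List.pyRange 0 (a + b - 1) 1).foldl (fun s d =>
      s + (pvGet2 (grid.map (pvPref 0)) (start + d)
             (t + ((w - 1) + (if d ≤ h - 1 then d else 2 * (h - 1) - d)) + 1)
           - pvGet2 (grid.map (pvPref 0)) (start + d) (t + |w - 1 - d|))) 0
      = pvDsum grid w h start t := by
  rw [PySem.List.foldl_add]
  unfold pvDsum
  rw [zero_add, ← hwh]
  apply congrArg
  apply List.map_congr_left
  intro d hd
  have hd' := (PySem.List.mem_pyRange_one).mp hd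
  have hj1n := pvJ1_nonneg w d hd'.1 hw
  have hj2l := pvJ2_le w h d
  have hj12 : pvJ1 w d ≤ pvJ2 w h d := (pvJ1J2_le w h d hw hh hd'.1).mpr (by omega)
  have hi0 : 0 ≤ start + d := by omega
  have hilt : (start + d).toNat < grid.length := by
    have := min_le_left (grid.length : Int) ((grid.headD []).length : Int)
    omega
  have hrow : PySem.List.pyGet? grid (start + d) = some (grid[(start + d).toNat]) :=
    PySem.List.pyGet?_eq_some_getElem (i := start + d) grid hi0 (by omega)
  have hmem : grid[(start + d).toNat] ∈ grid.take (min grid.length (grid.headD []).length) := by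
    have hlt : (start + d).toNat < (grid.take (min grid.length (grid.headD []).length)).length := by
      simp only [List.length_take]
      omega
    have := List.getElem_mem hlt
    rwa [List.getElem_take] at this
  have hlen : ((grid.headD []).length : Int) ≤ ((grid[(start + d).toNat]).length : Int) := by
    exact_mod_cast hrows _ hmem
  have hklo : (0 : Int) ≤ t + pvJ1 w d := by omega
  have hkhi : t + pvJ2 w h d + 1 ≤ ((grid[(start + d).toNat]).length : Int) := by omega
  rw [pvJ1_abs]
  rw [show (w - 1) + (if d ≤ h - 1 then d else 2 * (h - 1) - d) = pvJ2 w h d from rfl]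
  rw [pvGet2_pref grid (start + d) (t + pvJ2 w h d + 1) _ hrow hi0 (by omega) hkhi,
    pvGet2_pref grid (start + d) (t + pvJ1 w d) _ hrow hi0 hklo (by omega)]
  rw [pvSeg_take grid (start + d) _ hrow (pvJ2 w h d + 1 - pvJ1 w d).toNat
    (t + pvJ1 w d) (t + pvJ2 w h d + 1) hklo (by omega) (by omega) hkhi]

-- A's per-start build-and-slide equals a running max over all shifts
theorem pv_Astart (grid : List (List Int)) (a b w h start : Int) (c : Nat)
    (hw : 1 ≤ w) (hh : 1 ≤ h) (hwh : w + h = a + b)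
    (hspan : a + b - 1 ≤ min (grid.length : Int) ((grid.headD []).length : Int))
    (hc : (((grid.headD []).length : Int) - (a + b - 1) + 1).toNat ≤ c) :
    ∀ ret,
      pvSlideA grid (((grid.headD []).length : Int) - 1) start c ret
        (pvBuildA grid start w h (a + b).toNat start (w - 1) (w - 1) 0 []).1
        (pvBuildA grid start w h (a + b).toNat start (w - 1) (w - 1) 0 []).2
      = (PySem.List.pyRange 0 (((grid.headD []).length : Int) - (a + b - 1) + 1) 1).foldl
          (fun r t' => max r (pvDsum grid w h start t')) ret := by
  intro ret
  have hb : pvBuildA grid start w h (a + b).toNat start (w - 1) (w - 1) 0 []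
      = (pvDsum grid w h start 0, pvShape w h 0 0) := by
    have h0 := pvBuildA_eq grid start w h hw hh (a + b).toNat 0 0 [] le_rfl (by omega) (by omega)
    rw [show start + 0 = start by ring] at h0
    rw [show pvJ1 w 0 = w - 1 by unfold pvJ1; rw [if_pos (by omega)]; ring] at h0
    rw [show pvJ2 w h 0 = w - 1 by unfold pvJ2; rw [if_pos (by omega)]; ring] at h0
    rw [h0]
    unfold pvDsum
    rw [List.nil_append]
    refine congrArg (fun x => (x, pvShape w h 0 0)) ?_
    rw [zero_add]
    apply congrArg
    apply List.map_congr_left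
    intro d _
    rw [zero_add, zero_add]
  rw [hb]
  have hm0 : (0 : Int) ≤ ((grid.headD []).length : Int) := by positivity
  rw [pvSlideA_eq grid w h start ((grid.headD []).length : Int) hw hh c 0 ret le_rfl
      (by omega) (by omega)]
  rw [hwh]

-- the whole per-orientation start loop agrees between A and B
theorem pv_orient (grid : List (List Int)) (a b w h : Int)
    (hw : 1 ≤ w) (hh : 1 ≤ h) (hwh : w + h = a + b)
    (hspan : a + b - 1 ≤ min (grid.length : Int) ((grid.headD []).length : Int))
    (hrows : ∀ row ∈ grid.take (min grid.length (grid.headD []).length),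
      (grid.headD []).length ≤ row.length) :
    ∀ ret : Int,
    (PySem.List.pyRange 0 (min (grid.length : Int) ((grid.headD []).length : Int) - (a + b - 1) + 1) 1).foldl
      (fun ret start =>
        pvSlideA grid (((grid.headD []).length : Int) - 1) start (((grid.headD []).length : Int).toNat + 1) ret
          (pvBuildA grid start w h (a + b).toNat start (w - 1) (w - 1) 0 []).1
          (pvBuildA grid start w h (a + b).toNat start (w - 1) (w - 1) 0 []).2) ret
    = (PySem.List.pyRange 0 (min (grid.length : Int) ((grid.headD []).length : Int) - (a + b - 1) + 1) 1).foldl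
      (fun best start =>
        (PySem.List.pyRange 0 (((grid.headD []).length : Int) - (a + b - 1) + 1) 1).foldl
          (fun best t => max best ((PySem.List.pyRange 0 (a + b - 1) 1).foldl
            (fun s d => s + (pvGet2 (grid.map (pvPref 0)) (start + d)
                  (t + ((w - 1) + (if d ≤ h - 1 then d else 2 * (h - 1) - d)) + 1)
                - pvGet2 (grid.map (pvPref 0)) (start + d) (t + |w - 1 - d|))) 0)) best) ret := by
  intro ret
  apply PySem.List.foldl_congr_mem
  intro acc start hstart
  have hs := PySem.List.mem_pyRange_one.mp hstart
  have hm0 : (0 : Int) ≤ ((grid.headD []).length : Int) := by positivity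
  have hmin : min (grid.length : Int) ((grid.headD []).length : Int) ≤ ((grid.headD []).length : Int) :=
    min_le_right _ _
  rw [pv_Astart grid a b w h start _ hw hh hwh hspan (by omega) acc]
  apply PySem.List.foldl_congr_mem
  intro acc' t ht
  have ht' := PySem.List.mem_pyRange_one.mp ht
  rw [pv_Bsum grid a b w h start t hw hh hwh hspan hrows (by omega) (by omega)
    (by omega) (by omega)]

-- ===== VERDICT (by name: the statement is the Claim_ definition above) =====
theorem solution_spec : Claim_equal_solution := by
  intro grid a b _ hpre
  obtain ⟨hne, hcase⟩ := hpre
  unfold Spec_solution solution solution_alt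
  simp only []
  by_cases hearly : a + b - 1 > min (grid.length : Int) ((grid.headD []).length : Int)
  · rw [if_pos hearly, if_pos hearly]
  · rcases hcase with hlt | ⟨ha, hb1, hrows⟩
    · exact absurd hlt hearly
    · have hspan := not_lt.mp hearly
      rw [if_neg hearly, if_neg hearly]
      simp only [List.foldl_cons, List.foldl_nil]
      rw [pv_orient grid a b a b ha hb1 rfl hspan hrows 0,
        pv_orient grid a b b a hb1 ha (by ring) hspan hrows]
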